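-- pv_equiv track=rewrite | github.com/omusymcomp/area-surveillance | Create_maps.py | Chebyshev_distance
-- ===== SOURCE A (Python) =====
-- def Chebyshev_distance(nodes):
--     CP_info = []
--     for i in range(len(nodes)):
--         temp_row = []
--         for j in range(len(nodes)):
--             temp_row.append(max(abs(nodes[i][0]-nodes[j][0]), abs(nodes[i][1]-nodes[j][1]))) #2CP間のチェビシェフ距離
--         CP_info.append(temp_row)
--     return CP_info
-- ===== SOURCE B (Python) =====
-- def Chebyshev_distance(nodes):
--     n = len(nodes)
--     matrix = [[0] * n for _ in range(n)]
--     for i in range(n):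
--         for j in range(i + 1, n):
--             d = max(abs(nodes[i][0] - nodes[j][0]), abs(nodes[i][1] - nodes[j][1]))
--             matrix[i][j] = d
--             matrix[j][i] = d
--     return matrix
-- ===== Notes on version B (the rewrite author's own statement) =====
-- stated objective: alternative
-- what changed: B pre-allocates an n x n zero matrix and fills only the upper triangle, writing each Chebyshev distance to both symmetric cells and leaving the diagonal zero, instead of A's full n^2 per-cell recomputation via appended rows.
import Mathlib
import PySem

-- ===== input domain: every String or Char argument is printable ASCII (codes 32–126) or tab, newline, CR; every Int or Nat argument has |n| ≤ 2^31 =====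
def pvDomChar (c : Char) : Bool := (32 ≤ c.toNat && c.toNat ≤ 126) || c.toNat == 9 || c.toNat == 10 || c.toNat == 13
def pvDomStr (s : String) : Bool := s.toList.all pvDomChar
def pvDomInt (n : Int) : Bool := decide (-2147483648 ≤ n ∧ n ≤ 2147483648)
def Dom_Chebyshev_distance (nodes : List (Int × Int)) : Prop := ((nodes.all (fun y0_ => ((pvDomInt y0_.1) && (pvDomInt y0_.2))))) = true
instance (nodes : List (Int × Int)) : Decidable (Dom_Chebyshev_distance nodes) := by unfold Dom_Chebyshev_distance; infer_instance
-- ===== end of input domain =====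

-- B pre-allocates an n×n zero matrix and fills only the upper triangle, writing each Chebyshev
-- distance to both symmetric cells, instead of A's full n² per-cell recomputation with appends.

-- max(abs(nodes[i][0]-nodes[j][0]), abs(nodes[i][1]-nodes[j][1])); both programs only index
-- in range, so List.getD is exact here.
def chebD (nodes : List (Int × Int)) (i j : Nat) : Int :=
  max |((nodes.getD i (0,0)).1 - (nodes.getD j (0,0)).1)| |((nodes.getD i (0,0)).2 - (nodes.getD j (0,0)).2)|

-- ===== PORT A =====
def Chebyshev_distance (nodes : List (Int × Int)) : List (List Int) :=
  (List.range nodes.length).foldl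
    (fun CP_info i =>
      CP_info ++ [(List.range nodes.length).foldl
        (fun temp_row j => temp_row ++ [chebD nodes i j]) []])
    []

-- ===== PORT B =====
-- body of B's inner loop: d = …; matrix[i][j] = d; matrix[j][i] = d
def bStep (nodes : List (Int × Int)) (i : Nat) (m : List (List Int)) (j : Nat) : List (List Int) :=
  let d := chebD nodes i j
  let m1 := m.set i ((m.getD i []).set j d)
  m1.set j ((m1.getD j []).set i d)

def Chebyshev_distance_alt (nodes : List (Int × Int)) : List (List Int) :=
  let n := nodes.length
  (List.range n).foldl
    (fun m i => (List.range' (i+1) (n - (i+1))).foldl (bStep nodes i) m)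
    (List.replicate n (List.replicate n 0))

-- ===== PRECONDITION & SPEC =====
def Spec_Chebyshev_distance (nodes : List (Int × Int)) (out : List (List Int)) : Prop := out = Chebyshev_distance_alt nodes
instance (nodes : List (Int × Int)) (out : List (List Int)) : Decidable (Spec_Chebyshev_distance nodes out) := by unfold Spec_Chebyshev_distance; infer_instance

-- ===== CLAIM (what is proved, stated in full; the proofs are below) =====
def Claim_equal_Chebyshev_distance : Prop := ∀ (nodes : List (Int × Int)), Dom_Chebyshev_distance nodes → Spec_Chebyshev_distance nodes (Chebyshev_distance nodes)

-- ===== LEMMAS AND PROOFS =====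

theorem chebD_comm (nodes : List (Int × Int)) (i j : Nat) : chebD nodes i j = chebD nodes j i := by
  simp [chebD, abs_sub_comm]

theorem chebD_self (nodes : List (Int × Int)) (i : Nat) : chebD nodes i i = 0 := by
  simp [chebD]

-- the (p,q) cell of a matrix, as both programs address it
def entry (m : List (List Int)) (p q : Nat) : Int := (m.getD p []).getD q 0

theorem getD_set' {α : Type} (l : List α) (a : Nat) (x : α) (q : Nat) (d : α) :
    (l.set a x).getD q d = if a = q ∧ a < l.length then x else l.getD q d := by
  simp only [List.getD_eq_getElem?_getD, List.getElem?_set]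
  by_cases h1 : a = q
  · subst h1
    by_cases h2 : a < l.length <;> simp [h2]
  · simp [h1]

theorem entry_set (m : List (List Int)) (a : Nat) (row : List Int) (p q : Nat) :
    entry (m.set a row) p q = if a = p ∧ a < m.length then row.getD q 0 else entry m p q := by
  unfold entry
  rw [getD_set']
  split_ifs <;> rfl

def ShapeN (n : Nat) (m : List (List Int)) : Prop := m.length = n ∧ ∀ r ∈ m, r.length = n

theorem getD_row_len {n : Nat} {m : List (List Int)} (h : ShapeN n m) {i : Nat} (hi : i < n) :
    (m.getD i []).length = n := by
  have hlen : i < m.length := by rw [h.1]; exact hi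
  rw [List.getD_eq_getElem _ _ hlen]
  exact h.2 _ (List.getElem_mem hlen)

theorem shape_set {n : Nat} {m : List (List Int)} (h : ShapeN n m) {row : List Int}
    (hrow : row.length = n) (a : Nat) : ShapeN n (m.set a row) := by
  refine ⟨by simpa using h.1, fun r hr => ?_⟩
  rcases List.mem_or_eq_of_mem_set hr with h' | h'
  · exact h.2 r h'
  · simpa [h']

theorem shape_bStep {n : Nat} (nodes : List (Int × Int)) {m : List (List Int)} {i j : Nat}
    (h : ShapeN n m) (hi : i < n) (hj : j < n) : ShapeN n (bStep nodes i m j) := by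
  have h1 : ShapeN n (m.set i ((m.getD i []).set j (chebD nodes i j))) :=
    shape_set h (by rw [List.length_set]; exact getD_row_len h hi) i
  exact shape_set h1 (by rw [List.length_set]; exact getD_row_len h1 hj) j

theorem entry_bStep {n : Nat} (nodes : List (Int × Int)) {m : List (List Int)} {i j : Nat}
    (h : ShapeN n m) (hi : i < n) (hj : j < n) (hij : i ≠ j) (p q : Nat) :
    entry (bStep nodes i m j) p q =
      if (p = i ∧ q = j) ∨ (p = j ∧ q = i) then chebD nodes i j else entry m p q := by
  have h1 : ShapeN n (m.set i ((m.getD i []).set j (chebD nodes i j))) :=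
    shape_set h (by rw [List.length_set]; exact getD_row_len h hi) i
  have hgj : (m.set i ((m.getD i []).set j (chebD nodes i j))).getD j [] = m.getD j [] := by
    rw [getD_set']
    simp [hij]
  simp only [bStep]
  rw [hgj, entry_set, entry_set, getD_set', getD_set', h.1, h1.1,
    getD_row_len h hi, getD_row_len h hj]
  split_ifs <;> first | rfl | (exfalso; omega) | (unfold entry; simp_all)

theorem shape_innerFold {n : Nat} (nodes : List (Int × Int)) {i : Nat} (hi : i < n)
    (js : List Nat) (m : List (List Int)) (h : ShapeN n m)
    (hjs : ∀ j ∈ js, i < j ∧ j < n) :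
    ShapeN n (js.foldl (bStep nodes i) m) := by
  induction js generalizing m with
  | nil => exact h
  | cons hd tl ih =>
    simp only [List.foldl_cons]
    exact ih _ (shape_bStep nodes h hi (hjs hd (List.mem_cons_self)).2)
      (fun j hj => hjs j (List.mem_cons_of_mem _ hj))

theorem entry_innerFold {n : Nat} (nodes : List (Int × Int)) {i : Nat} (hi : i < n)
    (js : List Nat) (m : List (List Int)) (h : ShapeN n m)
    (hjs : ∀ j ∈ js, i < j ∧ j < n) (p q : Nat) :
    entry (js.foldl (bStep nodes i) m) p q =
      if (p = i ∧ q ∈ js) ∨ (q = i ∧ p ∈ js) then chebD nodes p q else entry m p q := by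
  induction js generalizing m with
  | nil => simp
  | cons hd tl ih =>
    have hhd := hjs hd List.mem_cons_self
    have hne : i ≠ hd := Nat.ne_of_lt hhd.1
    simp only [List.foldl_cons]
    rw [ih (bStep nodes i m hd) (shape_bStep nodes h hi hhd.2)
        (fun j hj => hjs j (List.mem_cons_of_mem _ hj))]
    rw [entry_bStep nodes h hi hhd.2 hne]
    simp only [List.mem_cons]
    by_cases htl : (p = i ∧ q ∈ tl) ∨ (q = i ∧ p ∈ tl)
    · rw [if_pos htl, if_pos (by tauto)]
    · rw [if_neg htl]
      by_cases hhd' : (p = i ∧ q = hd) ∨ (p = hd ∧ q = i)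
      · rw [if_pos hhd', if_pos (by tauto)]
        rcases hhd' with ⟨rfl, rfl⟩ | ⟨rfl, rfl⟩
        · rfl
        · exact chebD_comm _ _ _
      · rw [if_neg hhd', if_neg (by tauto)]

theorem shape_outerFold {n : Nat} (nodes : List (Int × Int))
    (is : List Nat) (m : List (List Int)) (h : ShapeN n m) (his : ∀ i ∈ is, i < n) :
    ShapeN n (is.foldl (fun m i => (List.range' (i+1) (n - (i+1))).foldl (bStep nodes i) m) m) := by
  induction is generalizing m with
  | nil => exact h
  | cons i tl ih =>
    have hi := his i List.mem_cons_self
    simp only [List.foldl_cons]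
    exact ih _ (shape_innerFold nodes hi _ m h
        (fun j hj => by rw [List.mem_range'_1] at hj; omega))
      (fun x hx => his x (List.mem_cons_of_mem _ hx))

theorem entry_outerFold {n : Nat} (nodes : List (Int × Int))
    (is : List Nat) (m : List (List Int)) (h : ShapeN n m) (his : ∀ i ∈ is, i < n) (p q : Nat) :
    entry (is.foldl (fun m i => (List.range' (i+1) (n - (i+1))).foldl (bStep nodes i) m) m) p q =
      if (p ∈ is ∧ p < q ∧ q < n) ∨ (q ∈ is ∧ q < p ∧ p < n) then chebD nodes p q
      else entry m p q := by
  induction is generalizing m with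
  | nil => simp
  | cons i tl ih =>
    have hi := his i List.mem_cons_self
    have hmem : ∀ x, x ∈ List.range' (i+1) (n - (i+1)) ↔ (i < x ∧ x < n) := by
      intro x
      rw [List.mem_range'_1]
      omega
    have hkey : ∀ j ∈ List.range' (i+1) (n - (i+1)), i < j ∧ j < n :=
      fun j hj => (hmem j).mp hj
    simp only [List.foldl_cons]
    rw [ih _ (shape_innerFold nodes hi _ m h hkey)
        (fun x hx => his x (List.mem_cons_of_mem _ hx))]
    rw [entry_innerFold nodes hi _ m h hkey p q]
    simp only [hmem, List.mem_cons]
    by_cases htl : (p ∈ tl ∧ p < q ∧ q < n) ∨ (q ∈ tl ∧ q < p ∧ p < n)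
    · rw [if_pos htl, if_pos (by tauto)]
    · rw [if_neg htl]
      by_cases hhd : (p = i ∧ i < q ∧ q < n) ∨ (q = i ∧ i < p ∧ p < n)
      · rw [if_pos hhd]
        rcases hhd with ⟨rfl, h1, h2⟩ | ⟨rfl, h1, h2⟩
        · rw [if_pos (Or.inl ⟨Or.inl rfl, h1, h2⟩)]
        · rw [if_pos (Or.inr ⟨Or.inl rfl, h1, h2⟩)]
      · rw [if_neg hhd]
        rw [if_neg ?_]
        rintro (⟨hp | hp, h1, h2⟩ | ⟨hq | hq, h1, h2⟩)
        · exact hhd (Or.inl ⟨hp, by omega, h2⟩)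
        · exact htl (Or.inl ⟨hp, h1, h2⟩)
        · exact hhd (Or.inr ⟨hq, by omega, h2⟩)
        · exact htl (Or.inr ⟨hq, h1, h2⟩)

theorem shape_init (n : Nat) : ShapeN n (List.replicate n (List.replicate n (0 : Int))) :=
  ⟨List.length_replicate, fun r hr => by rw [List.eq_of_mem_replicate hr]; exact List.length_replicate⟩

theorem B_entry (nodes : List (Int × Int)) (p q : Nat)
    (hp : p < nodes.length) (hq : q < nodes.length) :
    entry (Chebyshev_distance_alt nodes) p q = chebD nodes p q := by
  unfold Chebyshev_distance_alt
  rw [entry_outerFold nodes _ _ (shape_init nodes.length) (fun i hi => List.mem_range.mp hi) p q]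
  simp only [List.mem_range]
  by_cases hpq : p = q
  · subst hpq
    rw [if_neg (by omega)]
    simp [entry, List.getD_eq_getElem?_getD, hp, chebD_self]
  · rw [if_pos (by omega)]

theorem shape_B (nodes : List (Int × Int)) : ShapeN nodes.length (Chebyshev_distance_alt nodes) := by
  unfold Chebyshev_distance_alt
  exact shape_outerFold nodes _ _ (shape_init nodes.length) (fun i hi => List.mem_range.mp hi)

theorem foldl_append_map {α β : Type} (f : α → β) (l : List α) (acc : List β) :
    l.foldl (fun a x => a ++ [f x]) acc = acc ++ l.map f := by
  induction l generalizing acc with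
  | nil => simp
  | cons hd tl ih => simp [ih]

theorem A_char (nodes : List (Int × Int)) :
    Chebyshev_distance nodes =
      (List.range nodes.length).map
        (fun i => (List.range nodes.length).map (fun j => chebD nodes i j)) := by
  unfold Chebyshev_distance
  rw [foldl_append_map
    (fun i => (List.range nodes.length).foldl (fun temp_row j => temp_row ++ [chebD nodes i j]) [])
    (List.range nodes.length) [], List.nil_append]
  refine List.map_congr_left (fun i _ => ?_)
  rw [foldl_append_map (fun j => chebD nodes i j), List.nil_append]

-- ===== VERDICT (by name: the statement is the Claim_ definition above) =====
theorem Chebyshev_distance_spec : Claim_equal_Chebyshev_distance := by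
  intro nodes _
  unfold Spec_Chebyshev_distance
  rw [A_char]
  have hB := shape_B nodes
  apply List.ext_getElem
  · simp [hB.1]
  · intro i h1 h2
    have hi : i < nodes.length := by simpa using h1
    apply List.ext_getElem
    · simp [hB.2 _ (List.getElem_mem h2)]
    · intro j h3 h4
      have hj : j < nodes.length := by simpa using h3
      have key : entry (Chebyshev_distance_alt nodes) i j = (Chebyshev_distance_alt nodes)[i][j] := by
        simp [entry, List.getD_eq_getElem?_getD, List.getElem?_eq_getElem h2,
          List.getElem?_eq_getElem h4]
      simp only [List.getElem_map, List.getElem_range]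
      rw [← key]
      exact (B_entry nodes i j hi hj).symm
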